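-- pv_equiv track=rewrite | github.com/pierrellompart-Servier/AbXtract | AbXtract/utils/converters.py | fasta_to_dict
-- ===== SOURCE A (Python) =====
-- from typing import Dict, List, Union, Tuple, Optional, Any
--
-- def fasta_to_dict(fasta_string: str) -> Dict[str, str]:
--     """
--     Parse FASTA format string to dictionary.
--
--     Parameters
--     ----------
--     fasta_string : str
--         FASTA formatted string
--
--     Returns
--     -------
--     dict
--         Dictionary mapping sequence IDs to sequences
--     """
--     sequences = {}
--     current_id = None
--     current_seq = []
--
--     for line in fasta_string.strip().split('\n'):
--         line = line.strip()
--         if line.startswith('>'):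
--             if current_id is not None:
--                 sequences[current_id] = ''.join(current_seq)
--             current_id = line[1:].split()[0]  # Take first word as ID
--             current_seq = []
--         else:
--             current_seq.append(line)
--
--     # Don't forget the last sequence
--     if current_id is not None:
--         sequences[current_id] = ''.join(current_seq)
--
--     return sequences
-- ===== SOURCE B (Python) =====
-- def fasta_to_dict(fasta_string: str):
--     """Parse FASTA format string to dictionary (index-then-slice decomposition)."""
--     lines = [l.strip() for l in fasta_string.strip().split('\n')]
--     heads = [i for i, l in enumerate(lines) if l.startswith('>')]
--     sequences = {}
--     for h, nxt in zip(heads, heads[1:] + [len(lines)]):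
--         sequences[lines[h][1:].split()[0]] = ''.join(lines[h + 1:nxt])
--     return sequences
-- ===== Notes on version B (the rewrite author's own statement) =====
-- stated objective: alternative
-- what changed: B replaces A's single pass with a running (current_id, current_seq) accumulator by an index-then-slice decomposition: it first collects all header line indices, then for each header slices out and joins the lines up to the next header.
import Mathlib
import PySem

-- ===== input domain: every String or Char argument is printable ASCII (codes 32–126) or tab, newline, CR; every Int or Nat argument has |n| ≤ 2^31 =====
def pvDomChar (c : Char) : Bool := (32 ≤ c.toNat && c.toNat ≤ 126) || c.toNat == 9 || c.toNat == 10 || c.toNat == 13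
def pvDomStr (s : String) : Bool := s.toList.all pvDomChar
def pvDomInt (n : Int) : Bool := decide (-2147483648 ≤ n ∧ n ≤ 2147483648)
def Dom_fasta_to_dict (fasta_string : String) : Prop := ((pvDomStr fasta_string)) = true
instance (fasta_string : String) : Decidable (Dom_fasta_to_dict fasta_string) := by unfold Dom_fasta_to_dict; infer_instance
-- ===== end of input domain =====

-- B is an alternative decomposition of the same parse: header indices first, then slice-and-join; no speed claim.

-- ===== PORT A =====
-- `line[1:].split()[0]` (both sources compute the id this way; `.getD ""` is unreachable under Pre_)
def pvIdOf (t : String) : String :=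
  (PySem.List.pyGet? (PySem.Str.split₀ (PySem.Str.slice t (some 1) none)) 0).getD ""

-- the two `if current_id is not None: sequences[current_id] = ''.join(current_seq)` sites
def pvFlush (d : PySem.Dict String String) (cid : Option String) (cs : List String) :
    PySem.Dict String String :=
  match cid with
  | none => d
  | some i => d.insert i (PySem.Str.join "" cs)

-- A's `for line in fasta_string.strip().split('\n'):` loop, state (sequences, current_id, current_seq)
def pvLoopA (d : PySem.Dict String String) (cid : Option String) (cs : List String) :
    List String → PySem.Dict String String
  | [] => pvFlush d cid cs
  | l :: ls =>
    let line := PySem.Str.strip l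
    if PySem.Str.startswith line ">" then
      pvLoopA (pvFlush d cid cs) (some (pvIdOf line)) [] ls
    else
      pvLoopA d cid (cs ++ [line]) ls

def fasta_to_dict (fasta_string : String) : List (String × String) :=
  (pvLoopA PySem.Dict.empty none []
    ((PySem.Str.split? (PySem.Str.strip fasta_string) "\n").getD [])).items

-- ===== PORT B =====
def fasta_to_dict_alt (fasta_string : String) : List (String × String) :=
  let lines := ((PySem.Str.split? (PySem.Str.strip fasta_string) "\n").getD []).map PySem.Str.strip
  let heads := ((PySem.List.enumerate lines).filter
      (fun p => PySem.Str.startswith p.2 ">")).map (·.1)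
  ((heads.zip (PySem.List.slice heads (some 1) none ++ [(lines.length : Int)])).foldl
    (fun d p =>
      d.insert (pvIdOf ((PySem.List.pyGet? lines p.1).getD ""))
        (PySem.Str.join "" (PySem.List.slice lines (some (p.1 + 1)) (some p.2))))
    PySem.Dict.empty).items

-- ===== PRECONDITION & SPEC =====
-- Pre_ excludes exactly the inputs where a (stripped) header line has no word after '>' :
-- there `line[1:].split()[0]` raises IndexError in A (and in B alike).
def Pre_fasta_to_dict (fasta_string : String) : Prop :=
  ∀ l ∈ (PySem.Str.split? (PySem.Str.strip fasta_string) "\n").getD [],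
    PySem.Str.startswith (PySem.Str.strip l) ">" = true →
    PySem.Str.split₀ (PySem.Str.slice (PySem.Str.strip l) (some 1) none) ≠ []

instance (fasta_string : String) : Decidable (Pre_fasta_to_dict fasta_string) := by
  unfold Pre_fasta_to_dict; infer_instance

def pvWitness_fasta_to_dict : String := ">id1 extra\nACGT\nTT\n>id2\nGG"

def Spec_fasta_to_dict (fasta_string : String) (out : List (String × String)) : Prop := out = fasta_to_dict_alt fasta_string
instance (fasta_string : String) (out : List (String × String)) : Decidable (Spec_fasta_to_dict fasta_string out) := by unfold Spec_fasta_to_dict; infer_instance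

-- ===== CLAIM (what is proved, stated in full; the proofs are below) =====
def Claim_equal_fasta_to_dict : Prop := ∀ (fasta_string : String), Dom_fasta_to_dict fasta_string → Pre_fasta_to_dict fasta_string → Spec_fasta_to_dict fasta_string (fasta_to_dict fasta_string)

-- ===== LEMMAS AND PROOFS =====

-- the (id, joined-sequence) pairs of a stripped line list, by groups
def pvGp : List String → List (String × String)
  | [] => []
  | l :: ls =>
    if PySem.Str.startswith l ">" then
      (pvIdOf l,
        PySem.Str.join "" (ls.takeWhile (fun x => !PySem.Str.startswith x ">"))) ::
        pvGp (ls.dropWhile (fun x => !PySem.Str.startswith x ">"))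
    else pvGp ls
termination_by ls => ls.length
decreasing_by
  · simp only [List.length_cons]
    exact Nat.lt_succ_of_le (List.length_dropWhile_le _ _)
  · simp

-- header indices starting at offset s (proof-side mirror of B's enumerate/filter/map)
def pvHds (s : Int) : List String → List Int
  | [] => []
  | l :: ls =>
    if PySem.Str.startswith l ">" then s :: pvHds (s + 1) ls else pvHds (s + 1) ls

theorem pvGp_dropWhile (ls : List String) :
    pvGp (ls.dropWhile (fun x => !PySem.Str.startswith x ">")) = pvGp ls := by
  induction ls with
  | nil => simp
  | cons l ls ih =>
    by_cases h : PySem.Chars.startswith l.toList ['>'] = true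
    · rw [List.dropWhile_cons_of_neg (by simp [h])]
    · rw [List.dropWhile_cons_of_pos (by simp [h]), pvGp, if_neg (by simpa using h)]
      exact ih

theorem pvLoopA_eq (xs : List String) :
    ∀ (d : PySem.Dict String String) (cid : Option String) (cs : List String),
    pvLoopA d cid cs xs =
      (pvGp (xs.map PySem.Str.strip)).foldl (fun d p => d.insert p.1 p.2)
        (pvFlush d cid
          (cs ++ (xs.map PySem.Str.strip).takeWhile
            (fun x => !PySem.Str.startswith x ">"))) := by
  induction xs with
  | nil => intro d cid cs; simp [pvLoopA, pvGp]
  | cons x xs ih =>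
    intro d cid cs
    by_cases h : PySem.Chars.startswith (PySem.Chars.strip x.toList) ['>'] = true
    · simp only [pvLoopA]
      rw [if_pos (by simpa using h), ih, List.map_cons, pvGp,
        if_pos (by simpa using h), List.takeWhile_cons_of_neg (by simp [h]),
        List.foldl_cons, pvGp_dropWhile]
      simp [pvFlush]
    · simp only [pvLoopA]
      rw [if_neg (by simpa using h), ih, List.map_cons, pvGp,
        if_neg (by simpa using h), List.takeWhile_cons_of_pos (by simp [h])]
      simp

theorem pvHds_eq_enum (xs : List String) (s : Int) :
    ((PySem.List.enumerate xs s).filter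
        (fun p => PySem.Str.startswith p.2 ">")).map (·.1) = pvHds s xs := by
  induction xs generalizing s with
  | nil => simp [pvHds, PySem.List.enumerate_nil]
  | cons l ls ih =>
    rw [PySem.List.enumerate_cons, pvHds]
    by_cases h : PySem.Chars.startswith l.toList ['>'] = true
    · rw [if_pos (by simpa using h), List.filter_cons_of_pos (by simpa using h),
        List.map_cons, ih (s + 1)]
    · rw [if_neg (by simpa using h), List.filter_cons_of_neg (by simpa using h)]
      exact ih (s + 1)

theorem pvHds_shift (xs : List String) (s t : Int) :
    pvHds (s + t) xs = (pvHds s xs).map (· + t) := by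
  induction xs generalizing s with
  | nil => simp [pvHds]
  | cons l ls ih =>
    rw [pvHds, pvHds]
    by_cases h : PySem.Chars.startswith l.toList ['>'] = true
    · rw [if_pos (by simpa using h), if_pos (by simpa using h), List.map_cons,
        add_right_comm s t 1, ih (s + 1)]
    · rw [if_neg (by simpa using h), if_neg (by simpa using h),
        add_right_comm s t 1, ih (s + 1)]

theorem pvHds_nonneg (xs : List String) (s : Int) :
    ∀ a ∈ pvHds s xs, s ≤ a := by
  induction xs generalizing s with
  | nil => simp [pvHds]
  | cons l ls ih =>
    intro a ha
    rw [pvHds] at ha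
    by_cases h : PySem.Chars.startswith l.toList ['>'] = true
    · rw [if_pos (by simpa using h)] at ha
      rcases List.mem_cons.mp ha with rfl | ha
      · exact le_refl a
      · linarith [ih (s + 1) a ha]
    · rw [if_neg (by simpa using h)] at ha
      linarith [ih (s + 1) a ha]

theorem pvHds_nil_no_head (ls : List String) (s : Int) (h : pvHds s ls = []) :
    ∀ x ∈ ls, PySem.Chars.startswith x.toList ['>'] = false := by
  induction ls generalizing s with
  | nil => simp
  | cons l ls ih =>
    rw [pvHds] at h
    by_cases hm : PySem.Chars.startswith l.toList ['>'] = true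
    · rw [if_pos (by simpa using hm)] at h
      exact absurd h (List.cons_ne_nil _ _)
    · rw [if_neg (by simpa using hm)] at h
      intro x hx
      rcases List.mem_cons.mp hx with rfl | hx
      · simpa using hm
      · exact ih (s + 1) h x hx

theorem pvTake_firstHead (ls : List String) (s h : Int) (H : List Int)
    (hh : pvHds s ls = h :: H) :
    ls.take (h - s).toNat = ls.takeWhile (fun x => !PySem.Str.startswith x ">") := by
  induction ls generalizing s with
  | nil => simp [pvHds] at hh
  | cons l ls ih =>
    rw [pvHds] at hh
    by_cases hm : PySem.Chars.startswith l.toList ['>'] = true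
    · rw [if_pos (by simpa using hm)] at hh
      obtain ⟨rfl, -⟩ := List.cons.injEq .. ▸ hh
      rw [List.takeWhile_cons_of_neg (by simp [hm])]
      simp
    · rw [if_neg (by simpa using hm)] at hh
      have hs : s + 1 ≤ h := pvHds_nonneg ls (s + 1) h (hh ▸ List.mem_cons_self ..)
      have : (h - s).toNat = (h - (s + 1)).toNat + 1 := by omega
      rw [this, List.take_succ_cons, List.takeWhile_cons_of_pos (by simp [hm]), ih (s + 1) hh]

theorem pvShift (l : String) (ls : List String) (P : List (Int × Int))
    (h1 : ∀ p ∈ P, 0 ≤ p.1) (h2 : ∀ p ∈ P, 0 ≤ p.2) :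
    (P.map (fun p => (p.1 + 1, p.2 + 1))).map
      (fun p => (pvIdOf ((PySem.List.pyGet? (l :: ls) p.1).getD ""),
        PySem.Str.join "" (PySem.List.slice (l :: ls) (some (p.1 + 1)) (some p.2)))) =
    P.map (fun p => (pvIdOf ((PySem.List.pyGet? ls p.1).getD ""),
        PySem.Str.join "" (PySem.List.slice ls (some (p.1 + 1)) (some p.2)))) := by
  rw [List.map_map]
  apply List.map_congr_left
  intro p hp
  obtain ⟨k, hk⟩ : ∃ k : Nat, p.1 = (k : Int) :=
    ⟨p.1.toNat, (Int.toNat_of_nonneg (h1 p hp)).symm⟩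
  obtain ⟨m, hm⟩ : ∃ m : Nat, p.2 = (m : Int) :=
    ⟨p.2.toNat, (Int.toNat_of_nonneg (h2 p hp)).symm⟩
  simp only [Function.comp_apply, hk, hm]
  have e1 : ((k : Int) + 1) = ((k + 1 : Nat) : Int) := by push_cast; ring
  have e2 : (((k + 1 : Nat) : Int) + 1) = ((k + 2 : Nat) : Int) := by push_cast; ring
  have e3 : ((m : Int) + 1) = ((m + 1 : Nat) : Int) := by push_cast; ring
  rw [e1, e2, e3, PySem.List.pyGet?_natCast, PySem.List.pyGet?_natCast,
    PySem.List.slice_natCast, PySem.List.slice_natCast]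
  have e4 : m + 1 - (k + 2) = m - (k + 1) := by omega
  simp [e4]

set_option maxHeartbeats 1000000 in
theorem pvBmap_eq_gp (ls : List String) :
    ((pvHds 0 ls).zip ((pvHds 0 ls).tail ++ [(ls.length : Int)])).map
      (fun p =>
        (pvIdOf ((PySem.List.pyGet? ls p.1).getD ""),
          PySem.Str.join "" (PySem.List.slice ls (some (p.1 + 1)) (some p.2)))) = pvGp ls := by
  induction ls with
  | nil => rw [pvGp]; simp [pvHds]
  | cons l ls ih =>
    have hsh : pvHds (0 + 1) ls = (pvHds 0 ls).map (· + 1) := by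
      rw [add_comm]; exact pvHds_shift ls 0 1
    have hnn : ∀ a ∈ pvHds 0 ls, (0 : Int) ≤ a := pvHds_nonneg ls 0
    have hlen : (((l :: ls).length : Int)) = ((ls.length : Int) + 1) := by
      simp [List.length_cons]
    rw [pvHds, pvGp]
    by_cases hm : PySem.Chars.startswith l.toList ['>'] = true
    · rw [if_pos (by simpa using hm), if_pos (by simpa using hm), hsh, hlen]
      cases hH : pvHds 0 ls with
      | nil =>
        have hno := pvHds_nil_no_head ls 0 hH
        simp only [List.map_nil, List.tail_cons, List.nil_append, List.zip_cons_cons,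
          List.zip_nil_right, List.map_cons, List.map_nil]
        rw [List.takeWhile_eq_self_iff.mpr (by intro x hx; simp [hno x hx]),
          List.dropWhile_eq_nil_iff.mpr (by intro x hx; simp [hno x hx]), pvGp]
        have h1 : PySem.List.pyGet? (l :: ls) 0 = some l := by
          simp [PySem.List.pyGet?, PySem.List.pyIdx?]
        have h2 : PySem.List.slice (l :: ls) (some (1 : Int))
            (some ((ls.length : Int) + 1)) = ls := by
          rw [show ((ls.length : Int) + 1) = ((ls.length + 1 : Nat) : Int) by push_cast; ring,
            show ((1 : Int)) = ((1 : Nat) : Int) by norm_num, PySem.List.slice_natCast]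
          simp
        simp [h2]
      | cons hd H' =>
        have hd0 : (0 : Int) ≤ hd := hnn hd (hH ▸ List.mem_cons_self ..)
        simp only [List.map_cons, List.tail_cons, List.cons_append, List.zip_cons_cons,
          List.map_cons]
        have : (List.map (· + 1) H' ++ [(ls.length : Int) + 1]) =
            (H' ++ [(ls.length : Int)]).map (· + 1) := by simp
        rw [this, show ((hd + 1) :: List.map (fun x => x + 1) H' =
            List.map (fun x => x + 1) (hd :: H')) from rfl, List.zip_map,
          show (H' ++ [(ls.length : Int)] = (pvHds 0 ls).tail ++ [(ls.length : Int)]) by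
            simp [hH], ← hH]
        have := pvShift l ls ((pvHds 0 ls).zip ((pvHds 0 ls).tail ++ [(ls.length : Int)]))
          (fun p hp => hnn p.1 (List.of_mem_zip hp).1)
          (fun p hp => by
            rcases List.mem_append.mp (List.of_mem_zip hp).2 with h' | h'
            · exact hnn p.2 (List.mem_of_mem_tail h')
            · simp only [List.mem_singleton] at h'
              simp [h'])
        have hPmap : ∀ (Q : List (Int × Int)), Q.map (Prod.map (· + 1) (· + 1)) =
            Q.map (fun p => (p.1 + 1, p.2 + 1)) := by
          intro Q; apply List.map_congr_left; intro q hq; rfl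
        rw [hPmap]
        rw [this]
        rw [ih]
        rw [pvGp_dropWhile]
        have hhead : (pvIdOf ((PySem.List.pyGet? (l :: ls) 0).getD ""),
            PySem.Str.join "" (PySem.List.slice (l :: ls) (some (0 + 1)) (some (hd + 1)))) =
            (pvIdOf l,
              PySem.Str.join "" (ls.takeWhile (fun x => !PySem.Str.startswith x ">"))) := by
          obtain ⟨k, hk⟩ : ∃ k : Nat, hd = (k : Int) :=
            ⟨hd.toNat, (Int.toNat_of_nonneg hd0).symm⟩
          have htake := pvTake_firstHead ls 0 hd H' hH
          rw [hk] at htake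
          simp only [Int.sub_zero, Int.toNat_natCast] at htake
          have hg : PySem.List.pyGet? (l :: ls) 0 = some l := by
            simp [PySem.List.pyGet?, PySem.List.pyIdx?]
          rw [hk, show ((0 : Int) + 1) = ((1 : Nat) : Int) by norm_num,
            show ((k : Int) + 1) = ((k + 1 : Nat) : Int) by push_cast; ring,
            PySem.List.slice_natCast, hg]
          simp [htake]
        rw [hhead]
    · rw [if_neg (by simpa using hm), if_neg (by simpa using hm), hsh, hlen]
      rw [← List.map_tail]
      have : (List.map (· + 1) (pvHds 0 ls).tail ++ [(ls.length : Int) + 1]) =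
          ((pvHds 0 ls).tail ++ [(ls.length : Int)]).map (· + 1) := by simp
      rw [this, List.zip_map]
      have hPmap : ∀ (Q : List (Int × Int)), Q.map (Prod.map (· + 1) (· + 1)) =
          Q.map (fun p => (p.1 + 1, p.2 + 1)) := by
        intro Q; apply List.map_congr_left; intro q hq; rfl
      rw [hPmap, pvShift l ls _
        (fun p hp => hnn p.1 (List.of_mem_zip hp).1)
        (fun p hp => by
          rcases List.mem_append.mp (List.of_mem_zip hp).2 with h' | h'
          · exact hnn p.2 (List.mem_of_mem_tail h')
          · simp only [List.mem_singleton] at h'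
            simp [h']), ih]

-- ===== VERDICT (by name: the statement is the Claim_ definition above) =====
set_option maxHeartbeats 1000000 in
theorem fasta_to_dict_spec : Claim_equal_fasta_to_dict := by
  intro s _ _
  show fasta_to_dict s = fasta_to_dict_alt s
  unfold fasta_to_dict fasta_to_dict_alt
  dsimp only
  rw [pvLoopA_eq, pvHds_eq_enum, PySem.List.slice_from_one, ← pvBmap_eq_gp,
    List.foldl_map]
  simp [pvFlush]
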